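-- pv_equiv track=rewrite | github.com/theguyoverthere/CMU15-112-Spring17 | src/Week2/Homework/hw2.py | carrylessMultiply
-- ===== SOURCE A (Python) =====
-- def carrylessAdd(x, y):
--     nxDigits = digitCount(x)
--     nyDigits = digitCount(y)
--     carryLessSum = 0
--
--     for i in range(max(nxDigits, nyDigits)):
--         nthDigitX = x % 10
--         nthDigitY = y % 10
--
--         nthDigitS = nthDigitX + nthDigitY
--         if nthDigitS >= 10: nthDigitS %= 10
--
--         carryLessSum += nthDigitS * (10 ** i)
--         x //= 10
--         y //= 10
--
--     return carryLessSum
--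
-- def carrylessMultiply(x, y):
--     previousRunningSum = 0
--     numDigits = digitCount(y)
--
--     for i in range(numDigits):
--         nthDigits = y % 10
--         rowSum    = 0
--
--         for j in range(nthDigits):
--             carryLessSum = carrylessAdd(rowSum, x)
--             rowSum = carryLessSum
--
--         rowSum *= (10 ** i)
--
--         runningSum = carrylessAdd(rowSum, previousRunningSum)
--         previousRunningSum = runningSum
--         y //= 10
--
--     return runningSum
--
-- def digitCount(n):
--     if n == 0: return 1
--     count = 0
--     n = abs(n)
--
--     while n > 0:
--         count += 1
--         n //= 10
--     return count
-- ===== SOURCE B (Python) =====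
-- def digitCount(n):
--     if n == 0: return 1
--     count = 0
--     n = abs(n)
--
--     while n > 0:
--         count += 1
--         n //= 10
--     return count
--
-- def carrylessMultiply(x, y):
--     # Convolution table: table[p] accumulates the mod-10 partial digit products.
--     nx = digitCount(x)
--     ny = digitCount(y)
--     table = [0] * (nx + ny)
--
--     for j in range(ny):
--         dy = y // 10 ** j % 10
--         for i in range(nx):
--             table[i + j] += x // 10 ** i % 10 * dy % 10
--
--     total = 0
--     for p in range(nx + ny):
--         total += table[p] % 10 * 10 ** p
--     return total
-- ===== Notes on version B (the rewrite author's own statement) =====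
-- stated objective: alternative
-- what changed: B replaces A's repeated carryless additions (building each row by adding x digit-value-many times, then carryless-adding shifted rows) with a single schoolbook digit-convolution table accumulating (x_i*y_j) mod 10 at position i+j, then reading the result off the table.
import Mathlib
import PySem

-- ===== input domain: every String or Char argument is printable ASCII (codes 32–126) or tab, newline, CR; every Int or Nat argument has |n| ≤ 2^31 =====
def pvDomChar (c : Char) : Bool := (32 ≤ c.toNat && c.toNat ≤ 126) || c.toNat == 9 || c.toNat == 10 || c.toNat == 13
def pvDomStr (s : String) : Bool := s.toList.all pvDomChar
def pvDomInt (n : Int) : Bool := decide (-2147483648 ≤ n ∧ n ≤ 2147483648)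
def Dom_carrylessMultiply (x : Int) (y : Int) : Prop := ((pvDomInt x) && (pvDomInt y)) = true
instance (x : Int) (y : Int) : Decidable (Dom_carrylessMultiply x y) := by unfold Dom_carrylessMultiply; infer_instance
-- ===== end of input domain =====

-- B replaces A's repeated carryless additions by a single digit-convolution table; equivalence of the
-- RETURN value is proved for all integers (the Dom bound is not even needed by the proof).

-- ===== PORT A =====
-- `while n > 0: count += 1; n //= 10` of digitCount (divisor 10 > 0, so Python // is Int ediv via PySem)
def digitCountLoop (count : Int) (n : Int) : Int :=
  if 0 < n then digitCountLoop (count + 1) (PySem.Int.floordiv n 10) else count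
termination_by n.toNat
decreasing_by
  rw [PySem.Int.floordiv_eq_ediv_of_pos (by norm_num)]
  omega

def digitCount (n : Int) : Int :=
  if n = 0 then 1 else digitCountLoop 0 |n|

-- loop body of carrylessAdd: state (carryLessSum, x, y)
def cAddStep (st : Int × Int × Int) (i : Nat) : Int × Int × Int :=
  let s := st.1
  let x := st.2.1
  let y := st.2.2
  let nthDigitX := PySem.Int.mod x 10
  let nthDigitY := PySem.Int.mod y 10
  let nthDigitS0 := nthDigitX + nthDigitY
  let nthDigitS := if nthDigitS0 ≥ 10 then PySem.Int.mod nthDigitS0 10 else nthDigitS0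
  (s + nthDigitS * 10 ^ i, PySem.Int.floordiv x 10, PySem.Int.floordiv y 10)

def carrylessAdd (x : Int) (y : Int) : Int :=
  ((List.range (max (digitCount x) (digitCount y)).toNat).foldl cAddStep (0, x, y)).1

-- inner `for j in range(nthDigits): rowSum = carrylessAdd(rowSum, x)`
def rowLoop (x : Int) (d : Nat) : Int :=
  (List.range d).foldl (fun rowSum _ => carrylessAdd rowSum x) 0

-- outer loop body: state (previousRunningSum, y)
def mulStep (x : Int) (st : Int × Int) (i : Nat) : Int × Int :=
  let nthDigits := PySem.Int.mod st.2 10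
  let rowSum := rowLoop x nthDigits.toNat * 10 ^ i
  (carrylessAdd rowSum st.1, PySem.Int.floordiv st.2 10)

def carrylessMultiply (x : Int) (y : Int) : Int :=
  ((List.range (digitCount y).toNat).foldl (mulStep x) (0, y)).1

-- ===== PORT B =====
-- inner `for i in range(nx): table[i+j] += x // 10**i % 10 * dy % 10` (index i+j is always in range)
def tabInner (x : Int) (dy : Int) (nx j : Nat) (t : List Int) : List Int :=
  (List.range nx).foldl
    (fun t i => t.set (i + j) (t.getD (i + j) 0 + PySem.Int.mod (PySem.Int.mod (PySem.Int.floordiv x (10 ^ i)) 10 * dy) 10)) t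

def carrylessMultiply_alt (x : Int) (y : Int) : Int :=
  let nx := (digitCount x).toNat
  let ny := (digitCount y).toNat
  let table : List Int := List.replicate (nx + ny) 0
  let table := (List.range ny).foldl
    (fun t j => tabInner x (PySem.Int.mod (PySem.Int.floordiv y (10 ^ j)) 10) nx j t) table
  (List.range (nx + ny)).foldl (fun total p => total + PySem.Int.mod (table.getD p 0) 10 * 10 ^ p) 0

-- ===== PRECONDITION & SPEC =====
def Spec_carrylessMultiply (x : Int) (y : Int) (out : Int) : Prop := out = carrylessMultiply_alt x y
instance (x : Int) (y : Int) (out : Int) : Decidable (Spec_carrylessMultiply x y out) := by unfold Spec_carrylessMultiply; infer_instance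

-- ===== CLAIM (what is proved, stated in full; the proofs are below) =====
def Claim_equal_carrylessMultiply : Prop := ∀ (x : Int) (y : Int), Dom_carrylessMultiply x y → Spec_carrylessMultiply x y (carrylessMultiply x y)

-- ===== LEMMAS AND PROOFS =====

-- digit p of n (Python's n // 10**p % 10, divisor 10 > 0 so ediv/emod)
def pvDig (n : Int) (p : Nat) : Int := n / 10 ^ p % 10

-- the number with digit sequence f, up to position m
def pvS (f : Nat → Int) (m : Nat) : Int := ∑ p ∈ Finset.range m, f p * 10 ^ p

-- contribution of y-digit j at output position p
def pvC (x y : Int) (nx j p : Nat) : Int :=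
  if j ≤ p ∧ p - j < nx then (pvDig x (p - j) * pvDig y j) % 10 else 0

-- accumulated output digit at position p after the first i y-digits
def pvH (x y : Int) (nx i p : Nat) : Int := (∑ j ∈ Finset.range i, pvC x y nx j p) % 10

lemma pvDig_nonneg (n : Int) (p : Nat) : 0 ≤ pvDig n p := by
  unfold pvDig; omega

lemma pvDig_lt (n : Int) (p : Nat) : pvDig n p < 10 := by
  unfold pvDig; omega

lemma digitCountLoop_acc (n : Int) (c : Int) :
    digitCountLoop c n = c + digitCountLoop 0 n := by
  by_cases h : 0 < n
  · conv_lhs => rw [digitCountLoop]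
    conv_rhs => rw [digitCountLoop]
    rw [if_pos h, if_pos h,
      digitCountLoop_acc (PySem.Int.floordiv n 10) (c + 1),
      digitCountLoop_acc (PySem.Int.floordiv n 10) (0 + 1)]
    ring
  · rw [digitCountLoop, if_neg h, digitCountLoop, if_neg h]; ring
termination_by n.toNat
decreasing_by all_goals (rw [PySem.Int.floordiv_eq_ediv_of_pos (by norm_num)]; omega)

lemma digitCountLoop_bound (n : Int) (h : 0 ≤ n) :
    0 ≤ digitCountLoop 0 n ∧ n < 10 ^ (digitCountLoop 0 n).toNat ∧
      (0 < n → 10 ^ ((digitCountLoop 0 n).toNat - 1) ≤ n) := by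
  by_cases hp : 0 < n
  · have hd : PySem.Int.floordiv n 10 = n / 10 :=
      PySem.Int.floordiv_eq_ediv_of_pos (by norm_num)
    have ih := digitCountLoop_bound (PySem.Int.floordiv n 10) (by rw [hd]; omega)
    rw [digitCountLoop, if_pos hp, digitCountLoop_acc, hd]
    rw [hd] at ih
    obtain ⟨ih0, ihlt, ihge⟩ := ih
    set r := digitCountLoop 0 (n / 10) with hr
    have htn : (0 + 1 + r).toNat = r.toNat + 1 := by omega
    rw [htn]
    have hps : (10:Int) ^ (r.toNat + 1) = 10 * 10 ^ r.toNat := by ring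
    refine ⟨by omega, by omega, ?_⟩
    intro _
    by_cases hq : 0 < n / 10
    · have hk1 : 1 ≤ r.toNat := by
        rcases Nat.eq_zero_or_pos r.toNat with h0 | h1
        · rw [h0] at ihlt; simp at ihlt; omega
        · exact h1
      have := ihge hq
      have hpe : (10:Int) ^ (r.toNat + 1 - 1) = 10 * 10 ^ (r.toNat - 1) := by
        rw [show r.toNat + 1 - 1 = (r.toNat - 1) + 1 by omega]; ring
      rw [hpe]
      omega
    · have hn9 : n ≤ 9 := by omega
      have : r = 0 := by
        rw [hr, show n / 10 = 0 by omega, digitCountLoop]; simp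
      rw [this]
      simpa using hp
  · have hn0 : n = 0 := by omega
    subst hn0
    rw [digitCountLoop]
    norm_num
termination_by n.toNat
decreasing_by rw [PySem.Int.floordiv_eq_ediv_of_pos (by norm_num)]; omega

lemma digitCount_pos (n : Int) : 1 ≤ digitCount n := by
  unfold digitCount
  split
  · omega
  · next h =>
    have hp : 0 < |n| := abs_pos.mpr h
    rw [digitCountLoop, if_pos hp, digitCountLoop_acc]
    have := (digitCountLoop_bound (PySem.Int.floordiv |n| 10)
      (by rw [PySem.Int.floordiv_eq_ediv_of_pos (by norm_num)]; omega)).1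
    omega

lemma digitCount_bound (n : Int) : |n| < 10 ^ (digitCount n).toNat := by
  unfold digitCount
  split
  · next h => subst h; norm_num
  · next h =>
    exact (digitCountLoop_bound |n| (abs_nonneg n)).2.1

lemma digitCount_lower (n : Int) (h : n ≠ 0) :
    10 ^ ((digitCount n).toNat - 1) ≤ |n| := by
  unfold digitCount
  rw [if_neg h]
  exact (digitCountLoop_bound |n| (abs_nonneg n)).2.2 (abs_pos.mpr h)

lemma digitCount_le (a : Int) (m : Nat) (h0 : 0 ≤ a) (h : a < 10 ^ m) (hm : 1 ≤ m) :
    (digitCount a).toNat ≤ m := by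
  by_cases ha : a = 0
  · subst ha; unfold digitCount; simpa using hm
  · have hl := digitCount_lower a ha
    rw [abs_of_nonneg h0] at hl
    have : (10:Int) ^ ((digitCount a).toNat - 1) < 10 ^ m := lt_of_le_of_lt hl h
    have hlt : (digitCount a).toNat - 1 < m := by
      exact_mod_cast (pow_lt_pow_iff_right₀ (by norm_num : (1:Int) < 10)).mp this
    omega

lemma pvS_nonneg (f : Nat → Int) (m : Nat) (hb : ∀ p, 0 ≤ f p) : 0 ≤ pvS f m := by
  unfold pvS
  exact Finset.sum_nonneg fun p _ => mul_nonneg (hb p) (by positivity)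

lemma pvS_lt (f : Nat → Int) (m : Nat) (hb : ∀ p, f p < 10) : pvS f m < 10 ^ m := by
  induction m with
  | zero => simp [pvS]
  | succ m ih =>
    rw [pvS, Finset.sum_range_succ, ← pvS]
    have h1 : f m * 10 ^ m ≤ 9 * 10 ^ m :=
      mul_le_mul_of_nonneg_right (by have := hb m; omega) (by positivity)
    have h2 : (10:Int) ^ (m + 1) = 10 * 10 ^ m := by ring
    omega

lemma pvDig_zero_of_lt (a : Int) (p : Nat) (h0 : 0 ≤ a) (h : a < 10 ^ p) : pvDig a p = 0 := by
  unfold pvDig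
  rw [Int.ediv_eq_zero_of_lt h0 h]
  simp

lemma pvDig_pvS (f : Nat → Int) (m : Nat) (hb : ∀ p, 0 ≤ f p ∧ f p < 10) (p : Nat) :
    pvDig (pvS f m) p = if p < m then f p else 0 := by
  induction m with
  | zero =>
    simp only [pvS, Finset.range_zero, Finset.sum_empty, Nat.not_lt_zero, if_false]
    simp [pvDig]
  | succ m ih =>
    have ha0 : 0 ≤ pvS f m := pvS_nonneg f m (fun q => (hb q).1)
    have halt : pvS f m < 10 ^ m := pvS_lt f m (fun q => (hb q).2)
    rcases lt_trichotomy p m with hp | hp | hp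
    · rw [if_pos (by omega)]
      rw [pvS, Finset.sum_range_succ, ← pvS]
      unfold pvDig
      have hpow : (10:Int) ^ m = 10 ^ (m - p - 1) * 10 * 10 ^ p := by
        rw [show (10:Int) ^ (m - p - 1) * 10 * 10 ^ p = 10 ^ ((m - p - 1) + 1 + p) by ring]
        congr 1
        omega
      have hsplit : f m * 10 ^ m = (f m * 10 ^ (m - p - 1) * 10) * 10 ^ p := by
        rw [hpow]; ring
      rw [hsplit, Int.add_mul_ediv_right _ _ (by positivity : (10:Int) ^ p ≠ 0)]
      have hih := ih
      rw [if_pos hp] at hih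
      unfold pvDig at hih
      set u := pvS f m / 10 ^ p
      set v := f m * 10 ^ (m - p - 1)
      have : (u + v * 10) % 10 = u % 10 := by omega
      rw [this, hih]
    · subst hp
      rw [if_pos (by omega)]
      rw [pvS, Finset.sum_range_succ, ← pvS]
      unfold pvDig
      rw [show f p * 10 ^ p = f p * 10 ^ p by rfl]
      rw [Int.add_mul_ediv_right _ _ (by positivity : (10:Int) ^ p ≠ 0),
        Int.ediv_eq_zero_of_lt ha0 halt]
      have := hb p
      omega
    · rw [if_neg (by omega)]
      apply pvDig_zero_of_lt
      · exact pvS_nonneg f (m + 1) (fun q => (hb q).1)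
      · calc pvS f (m + 1) < 10 ^ (m + 1) := pvS_lt f (m + 1) (fun q => (hb q).2)
          _ ≤ 10 ^ p := pow_le_pow_right₀ (by norm_num) (by omega)

lemma pyMod10 (a : Int) : PySem.Int.mod a 10 = a % 10 :=
  PySem.Int.mod_eq_emod_of_pos (by norm_num)

lemma pyDiv10 (a : Int) : PySem.Int.floordiv a 10 = a / 10 :=
  PySem.Int.floordiv_eq_ediv_of_pos (by norm_num)

lemma ediv_pow_succ (a : Int) (m : Nat) : a / 10 ^ m / 10 = a / 10 ^ (m + 1) := by
  rw [Int.ediv_ediv_of_nonneg (by positivity), ← pow_succ]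

-- carrylessAdd's loop, characterized
lemma cAdd_fold (x y : Int) (m : Nat) :
    (List.range m).foldl cAddStep (0, x, y) =
      (pvS (fun p => (pvDig x p + pvDig y p) % 10) m, x / 10 ^ m, y / 10 ^ m) := by
  induction m with
  | zero => simp [pvS]
  | succ m ih =>
    rw [List.range_succ, List.foldl_append, ih]
    simp only [List.foldl_cons, List.foldl_nil, cAddStep, pyMod10, pyDiv10,
      Prod.mk.injEq]
    refine ⟨?_, ediv_pow_succ x m, ediv_pow_succ y m⟩
    have hbx1 := pvDig_nonneg x m
    have hbx2 := pvDig_lt x m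
    have hby1 := pvDig_nonneg y m
    have hby2 := pvDig_lt y m
    have hio : (if pvDig x m + pvDig y m ≥ 10 then (pvDig x m + pvDig y m) % 10
        else pvDig x m + pvDig y m) = (pvDig x m + pvDig y m) % 10 := by
      split_ifs with h
      · rfl
      · omega
    show pvS (fun p => (pvDig x p + pvDig y p) % 10) m +
        (if pvDig x m + pvDig y m ≥ 10 then (pvDig x m + pvDig y m) % 10
          else pvDig x m + pvDig y m) * 10 ^ m = _
    rw [hio]
    conv_rhs => rw [pvS, Finset.sum_range_succ]
    rw [← pvS]

lemma pvS_extend (f : Nat → Int) (m M : Nat) (hmM : m ≤ M)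
    (hz : ∀ p, m ≤ p → f p = 0) : pvS f M = pvS f m := by
  unfold pvS
  refine (Finset.sum_subset (Finset.range_subset_range.mpr hmM) ?_).symm
  intro p _ hpm
  rw [hz p (by simpa using hpm)]
  ring

lemma pvDig_zero_of_dc (a : Int) (p : Nat) (ha : 0 ≤ a) (hp : (digitCount a).toNat ≤ p) :
    pvDig a p = 0 := by
  apply pvDig_zero_of_lt a p ha
  calc a = |a| := (abs_of_nonneg ha).symm
    _ < 10 ^ (digitCount a).toNat := digitCount_bound a
    _ ≤ 10 ^ p := pow_le_pow_right₀ (by norm_num) hp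

-- carrylessAdd over any bound M covering both digit counts
lemma carrylessAdd_eq (a b : Int) (M : Nat) (ha : 0 ≤ a) (hb : 0 ≤ b)
    (hA : (digitCount a).toNat ≤ M) (hB : (digitCount b).toNat ≤ M) :
    carrylessAdd a b = pvS (fun p => (pvDig a p + pvDig b p) % 10) M := by
  unfold carrylessAdd
  rw [cAdd_fold]
  have hmm : (max (digitCount a) (digitCount b)).toNat =
      max (digitCount a).toNat (digitCount b).toNat := by omega
  rw [hmm]
  refine (pvS_extend _ _ M (by omega) ?_).symm
  intro p hp
  rw [pvDig_zero_of_dc a p ha (by omega), pvDig_zero_of_dc b p hb (by omega)]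
  simp

lemma rowLoop_eq (x : Int) (k : Nat) :
    rowLoop x k = pvS (fun q => ((k : Int) * pvDig x q) % 10) (digitCount x).toNat := by
  induction k with
  | zero =>
    rw [rowLoop]
    simp only [List.range_zero, List.foldl_nil]
    refine (Finset.sum_eq_zero ?_).symm
    intro p _
    simp
  | succ k ih =>
    have hstep : rowLoop x (k + 1) = carrylessAdd (rowLoop x k) x := by
      rw [rowLoop, List.range_succ, List.foldl_append, ← rowLoop]
      simp
    rw [hstep, ih]
    set nx := (digitCount x).toNat with hnx
    set a := pvS (fun q => ((k : Int) * pvDig x q) % 10) nx with hadef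
    have hbF : ∀ q, 0 ≤ ((k : Int) * pvDig x q) % 10 ∧ ((k : Int) * pvDig x q) % 10 < 10 := by
      intro q; omega
    have ha0 : 0 ≤ a := pvS_nonneg _ _ (fun q => (hbF q).1)
    have haLt : a < 10 ^ nx := pvS_lt _ _ (fun q => (hbF q).2)
    have hnx1 : 1 ≤ nx := by have := digitCount_pos x; omega
    have hdca : (digitCount a).toNat ≤ nx := digitCount_le a nx ha0 haLt hnx1
    have hM : (max (digitCount a) (digitCount x)).toNat = nx := by omega
    unfold carrylessAdd
    rw [cAdd_fold, hM]
    show pvS (fun p => (pvDig a p + pvDig x p) % 10) nx = _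
    unfold pvS
    refine Finset.sum_congr rfl ?_
    intro p hp
    rw [Finset.mem_range] at hp
    have hda : pvDig a p = ((k : Int) * pvDig x p) % 10 := by
      rw [hadef, pvDig_pvS _ _ hbF p, if_pos hp]
    simp only []
    rw [hda]
    congr 1
    push_cast
    set u := (k : Int) * pvDig x p with hu
    have hk1 : ((k : Int) + 1) * pvDig x p = u + pvDig x p := by rw [hu]; ring
    rw [hk1]
    omega

lemma pvS_shift (g : Nat → Int) (m i n : Nat) (h : m + i ≤ n) :
    pvS (fun p => if i ≤ p ∧ p - i < m then g (p - i) else 0) n = pvS g m * 10 ^ i := by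
  unfold pvS
  rw [Finset.sum_mul]
  have hsub : Finset.Ico i (m + i) ⊆ Finset.range n := by
    intro p hp
    rw [Finset.mem_Ico] at hp
    exact Finset.mem_range.mpr (by omega)
  rw [← Finset.sum_subset hsub (fun p _ hpn => by
    rw [Finset.mem_Ico] at hpn
    simp only []
    rw [if_neg (by omega)]
    ring)]
  rw [Finset.sum_Ico_eq_sum_range]
  rw [show m + i - i = m by omega]
  refine Finset.sum_congr rfl ?_
  intro q hq
  rw [Finset.mem_range] at hq
  simp only []
  rw [if_pos (by omega), show i + q - i = q by omega, pow_add]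
  ring

lemma pvC_bounds (x y : Int) (nx j p : Nat) : 0 ≤ pvC x y nx j p ∧ pvC x y nx j p < 10 := by
  unfold pvC
  split_ifs
  · omega
  · omega

lemma pvH_bounds (x y : Int) (nx i p : Nat) : 0 ≤ pvH x y nx i p ∧ pvH x y nx i p < 10 := by
  unfold pvH
  omega

lemma mul_fold (x y : Int) (i : Nat) (hi : i ≤ (digitCount y).toNat) :
    (List.range i).foldl (mulStep x) (0, y) =
      (pvS (pvH x y (digitCount x).toNat i) ((digitCount x).toNat + (digitCount y).toNat),
       y / 10 ^ i) := by
  induction i with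
  | zero =>
    simp only [List.range_zero, List.foldl_nil, pow_zero, Int.ediv_one, Prod.mk.injEq]
    refine ⟨?_, trivial⟩
    refine (Finset.sum_eq_zero ?_).symm
    intro p _
    simp [pvH]
  | succ i ih =>
    set nx := (digitCount x).toNat with hnxdef
    set ny := (digitCount y).toNat with hnydef
    set N := nx + ny with hNdef
    have hnx1 : 1 ≤ nx := by have := digitCount_pos x; omega
    have hN1 : 1 ≤ N := by omega
    rw [List.range_succ, List.foldl_append, ih (by omega)]
    simp only [List.foldl_cons, List.foldl_nil]
    unfold mulStep
    simp only [pyMod10, pyDiv10, Prod.mk.injEq]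
    refine ⟨?_, ediv_pow_succ y i⟩
    have hdy : (y / 10 ^ i) % 10 = pvDig y i := rfl
    rw [hdy]
    have hcast : (((pvDig y i).toNat : Int)) = pvDig y i :=
      Int.toNat_of_nonneg (pvDig_nonneg y i)
    rw [rowLoop_eq, hcast]
    -- the shifted row is the convolution contribution of y-digit i
    have hrow : pvS (fun q => (pvDig y i * pvDig x q) % 10) nx * 10 ^ i =
        pvS (pvC x y nx i) N := by
      rw [← pvS_shift _ nx i N (by omega)]
      refine Finset.sum_congr rfl ?_
      intro p _
      simp only []
      unfold pvC
      split_ifs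
      · rw [mul_comm (pvDig x (p - i))]
      · rfl
    rw [← hnxdef, hrow]
    have hbH : ∀ p, 0 ≤ pvH x y nx i p ∧ pvH x y nx i p < 10 := pvH_bounds x y nx i
    have hbC : ∀ p, 0 ≤ pvC x y nx i p ∧ pvC x y nx i p < 10 := pvC_bounds x y nx i
    have hrow0 : 0 ≤ pvS (pvC x y nx i) N := pvS_nonneg _ _ (fun p => (hbC p).1)
    have hrowLt : pvS (pvC x y nx i) N < 10 ^ N := pvS_lt _ _ (fun p => (hbC p).2)
    have hprev0 : 0 ≤ pvS (pvH x y nx i) N := pvS_nonneg _ _ (fun p => (hbH p).1)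
    have hprevLt : pvS (pvH x y nx i) N < 10 ^ N := pvS_lt _ _ (fun p => (hbH p).2)
    rw [carrylessAdd_eq _ _ N hrow0 hprev0
      (digitCount_le _ N hrow0 hrowLt hN1) (digitCount_le _ N hprev0 hprevLt hN1)]
    unfold pvS
    refine Finset.sum_congr rfl ?_
    intro p hp
    rw [Finset.mem_range] at hp
    simp only []
    have h1 : pvDig (∑ q ∈ Finset.range N, pvC x y nx i q * 10 ^ q) p = pvC x y nx i p := by
      have h := pvDig_pvS _ N hbC p
      rw [if_pos hp] at h
      exact h
    have h2 : pvDig (∑ q ∈ Finset.range N, pvH x y nx i q * 10 ^ q) p = pvH x y nx i p := by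
      have h := pvDig_pvS _ N hbH p
      rw [if_pos hp] at h
      exact h
    rw [h1, h2]
    congr 1
    unfold pvH
    rw [Finset.sum_range_succ]
    set u := ∑ j ∈ Finset.range i, pvC x y nx j p
    omega

lemma tabFold_length (x dy : Int) (j : Nat) (l : List Nat) (t : List Int) :
    (l.foldl
      (fun t i => t.set (i + j) (t.getD (i + j) 0 + PySem.Int.mod (PySem.Int.mod (PySem.Int.floordiv x (10 ^ i)) 10 * dy) 10)) t).length
      = t.length := by
  induction l generalizing t with
  | nil => rfl
  | cons i l ih =>
    rw [List.foldl_cons, ih]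
    simp

lemma tabFold_getD (x dy : Int) (j k : Nat) (t : List Int) (p : Nat)
    (hlen : k + j ≤ t.length) :
    ((List.range k).foldl
      (fun t i => t.set (i + j) (t.getD (i + j) 0 + PySem.Int.mod (PySem.Int.mod (PySem.Int.floordiv x (10 ^ i)) 10 * dy) 10)) t).getD p 0
      = t.getD p 0 + (if j ≤ p ∧ p - j < k then (pvDig x (p - j) * dy) % 10 else 0) := by
  induction k with
  | zero => simp
  | succ k ih =>
    rw [List.range_succ, List.foldl_append, List.foldl_cons, List.foldl_nil]
    set t' := (List.range k).foldl
      (fun t i => t.set (i + j) (t.getD (i + j) 0 + PySem.Int.mod (PySem.Int.mod (PySem.Int.floordiv x (10 ^ i)) 10 * dy) 10)) t with ht'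
    have hlen' : t'.length = t.length := tabFold_length x dy j (List.range k) t
    have hv : PySem.Int.mod (PySem.Int.mod (PySem.Int.floordiv x (10 ^ k)) 10 * dy) 10 =
        (pvDig x k * dy) % 10 := by
      rw [pyMod10, pyMod10, PySem.Int.floordiv_eq_ediv_of_pos (by positivity)]
      rfl
    rw [hv]
    by_cases hpk : p = k + j
    · subst hpk
      have hin : k + j < t'.length := by omega
      rw [List.getD_eq_getElem?_getD, List.getElem?_set_self hin, Option.getD_some]
      rw [ih (by omega), if_neg (by omega : ¬(j ≤ k + j ∧ k + j - j < k)), if_pos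
        (by omega : j ≤ k + j ∧ k + j - j < k + 1), show k + j - j = k from by omega]
      ring
    · rw [List.getD_eq_getElem?_getD, List.getElem?_set_ne (by omega : k + j ≠ p),
        ← List.getD_eq_getElem?_getD, ih (by omega)]
      have hiff : (j ≤ p ∧ p - j < k) ↔ (j ≤ p ∧ p - j < k + 1) := by omega
      rw [if_congr hiff rfl rfl]

lemma outer_length (x y : Int) (nx : Nat) (l : List Nat) (t : List Int) :
    (l.foldl (fun t j => tabInner x (PySem.Int.mod (PySem.Int.floordiv y (10 ^ j)) 10) nx j t) t).length = t.length := by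
  induction l generalizing t with
  | nil => rfl
  | cons i l ih =>
    rw [List.foldl_cons, ih]
    unfold tabInner
    exact tabFold_length _ _ _ _ _

lemma outer_getD (x y : Int) (nx N m : Nat) (hm : nx + m ≤ N + 1) (p : Nat) :
    ((List.range m).foldl
        (fun t j => tabInner x (PySem.Int.mod (PySem.Int.floordiv y (10 ^ j)) 10) nx j t)
        (List.replicate N 0)).getD p 0
      = ∑ j ∈ Finset.range m, pvC x y nx j p := by
  induction m with
  | zero => simp [List.getD_eq_getElem?_getD]
  | succ m ih =>
    rw [List.range_succ, List.foldl_append, List.foldl_cons, List.foldl_nil]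
    set t' := (List.range m).foldl
        (fun t j => tabInner x (PySem.Int.mod (PySem.Int.floordiv y (10 ^ j)) 10) nx j t)
        (List.replicate N 0) with ht'
    have hlen : t'.length = N := by
      rw [ht', outer_length]
      simp
    have hdy : PySem.Int.mod (PySem.Int.floordiv y (10 ^ m)) 10 = pvDig y m := by
      rw [pyMod10, PySem.Int.floordiv_eq_ediv_of_pos (by positivity)]
      rfl
    unfold tabInner
    rw [tabFold_getD x _ m nx t' p (by omega), ih (by omega), Finset.sum_range_succ]
    congr 1
    rw [hdy]
    rfl

lemma alt_eq (x y : Int) :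
    carrylessMultiply_alt x y =
      pvS (pvH x y (digitCount x).toNat (digitCount y).toNat)
        ((digitCount x).toNat + (digitCount y).toNat) := by
  unfold carrylessMultiply_alt
  rw [PySem.List.foldl_add]
  set nx := (digitCount x).toNat
  set ny := (digitCount y).toNat
  set N := nx + ny with hN
  rw [zero_add]
  show ∑ p ∈ Finset.range N, _ = _
  unfold pvS
  refine Finset.sum_congr rfl ?_
  intro p hp
  rw [pyMod10, outer_getD x y nx N ny (by omega) p]
  rfl

-- ===== VERDICT (by name: the statement is the Claim_ definition above) =====
theorem carrylessMultiply_spec : Claim_equal_carrylessMultiply := by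
  intro x y _
  unfold Spec_carrylessMultiply
  rw [alt_eq]
  unfold carrylessMultiply
  rw [mul_fold x y (digitCount y).toNat le_rfl]
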